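-- pv_equiv track=rewrite | github.com/Steven23X/UniversityCS | Year1/Semester1/Algorithm programming/Solutions/Solutions_Seminar1/f10to2.py | f10to2
-- ===== SOURCE A (Python) =====
-- def f10to2(x):
--     rez=0
--     p10=1
--     while x>0:
--         a=x%2
--         x=x//2
--         rez=rez + p10*a
--         p10*=10
--     return rez
-- ===== SOURCE B (Python) =====
-- def f10to2(x):
--     if x <= 0:
--         return 0
--     return sum(10 ** i for i, c in enumerate(reversed(bin(x)[2:])) if c == '1')
-- ===== Notes on version B (the rewrite author's own statement) =====
-- stated objective: alternative
-- what changed: B lets bin() build the binary digit string and sums the corresponding powers of ten at the positions of its set-bit characters (returning zero for non-positive x), instead of A's manual divmod-and-power-of-ten accumulation loop.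
import Mathlib
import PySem

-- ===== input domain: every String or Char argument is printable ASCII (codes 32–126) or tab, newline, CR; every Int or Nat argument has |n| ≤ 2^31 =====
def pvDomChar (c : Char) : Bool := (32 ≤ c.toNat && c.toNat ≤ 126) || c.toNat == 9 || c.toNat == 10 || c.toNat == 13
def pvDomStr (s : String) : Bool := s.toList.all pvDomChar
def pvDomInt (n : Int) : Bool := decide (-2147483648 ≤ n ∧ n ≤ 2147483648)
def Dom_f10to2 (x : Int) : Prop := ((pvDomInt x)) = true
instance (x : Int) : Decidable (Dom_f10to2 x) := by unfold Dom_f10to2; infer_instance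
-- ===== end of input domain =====

-- B replaces A's manual divmod-and-power-of-ten accumulation loop by letting bin() build the
-- binary digit string and summing 10**i over the positions of its '1' characters (objective: alternative).

-- ===== PORT A =====
-- termination helper for A's while loop (cited by decreasing_by)
theorem pvHalfLt_f10to2 (x : Int) (h : 0 < x) :
    (PySem.Int.floordiv x 2).toNat < x.toNat := by
  simp only [PySem.Int.floordiv, Int.fdiv_eq_ediv]
  simp
  omega

def f10to2Loop (x rez p10 : Int) : Int :=
  if x > 0 then
    -- a = x % 2; x = x // 2; rez = rez + p10*a; p10 *= 10
    f10to2Loop (PySem.Int.floordiv x 2) (rez + p10 * PySem.Int.mod x 2) (p10 * 10)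
  else rez
termination_by x.toNat
decreasing_by exact pvHalfLt_f10to2 x (by omega)

def f10to2 (x : Int) : Int := f10to2Loop x 0 1

-- ===== PORT B =====
-- sum(10 ** i for i, c in enumerate(reversed(bin(x)[2:])) if c == '1')
-- enumerate indices start at 0, so 10 ** i is ported as 10 ^ i.toNat (exact: i ≥ 0 here).
def f10to2_alt (x : Int) : Int :=
  if x ≤ 0 then 0
  else
    (PySem.List.enumerate (PySem.List.slice (PySem.Int.pyBin x).toList (some 2) none).reverse 0).foldl
      (fun acc p => if p.2 = '1' then acc + 10 ^ p.1.toNat else acc) 0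

-- ===== PRECONDITION & SPEC =====
def Spec_f10to2 (x : Int) (out : Int) : Prop := out = f10to2_alt x
instance (x : Int) (out : Int) : Decidable (Spec_f10to2 x out) := by unfold Spec_f10to2; infer_instance

-- ===== CLAIM (what is proved, stated in full; the proofs are below) =====
def Claim_equal_f10to2 : Prop := ∀ (x : Int), Dom_f10to2 x → Spec_f10to2 x (f10to2 x)

-- ===== LEMMAS AND PROOFS =====

-- the common value: decimal reading of the binary digits of n, LSB contributing the units digit
def pvG (n : Nat) : Int :=
  if n = 0 then 0 else ((n % 2 : Nat) : Int) + 10 * pvG (n / 2)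
termination_by n
decreasing_by omega

-- decimal reading of a LSB-first list of binary digit characters
def pvW : List Char → Int
  | [] => 0
  | c :: cs => (if c = '1' then 1 else 0) + 10 * pvW cs

theorem pvLoop_eq (x rez p10 : Int) : f10to2Loop x rez p10 = rez + p10 * pvG x.toNat := by
  induction x, rez, p10 using f10to2Loop.induct with
  | case1 x rez p10 h ih =>
    rw [f10to2Loop]
    simp only [h, if_pos, ih]
    have hm : PySem.Int.mod x 2 = ((x.toNat % 2 : Nat) : Int) := by
      have : x = (x.toNat : Int) := by omega
      rw [this]
      simp [PySem.Int.mod, Int.fmod_eq_emod]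
    have hd : (PySem.Int.floordiv x 2).toNat = x.toNat / 2 := by
      have : x = (x.toNat : Int) := by omega
      rw [this]
      simp only [PySem.Int.floordiv, Int.fdiv_eq_ediv]
      simp
      omega
    have hg : pvG x.toNat = ((x.toNat % 2 : Nat) : Int) + 10 * pvG (x.toNat / 2) := by
      rw [pvG]
      simp only [if_neg (by omega : ¬ x.toNat = 0)]
    rw [hm, hd, hg]
    ring
  | case2 x rez p10 h =>
    rw [f10to2Loop]
    simp only [if_neg h]
    have : x.toNat = 0 := by omega
    rw [this, pvG]
    simp

theorem pvFold_eq (cs : List Char) : ∀ (s acc : Int), 0 ≤ s →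
    (PySem.List.enumerate cs s).foldl
      (fun acc p => if p.2 = '1' then acc + 10 ^ p.1.toNat else acc) acc
    = acc + 10 ^ s.toNat * pvW cs := by
  induction cs with
  | nil => intro s acc _; simp [PySem.List.enumerate_nil, pvW]
  | cons c cs ih =>
    intro s acc hs
    rw [PySem.List.enumerate_cons, List.foldl_cons, ih (s + 1) _ (by omega)]
    have hpow : (10 : Int) ^ (s + 1).toNat = 10 ^ s.toNat * 10 := by
      have : (s + 1).toNat = s.toNat + 1 := by omega
      rw [this, pow_succ]
    rw [pvW, hpow]
    by_cases hc : c = '1' <;> simp [hc] <;> ring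

theorem pvW_rev (n : Nat) (hn : 0 < n) : pvW (Nat.toDigits 2 n).reverse = pvG n := by
  induction n using Nat.strong_induction_on with
  | _ n ih =>
    rw [Nat.toDigits_eq_if (by norm_num)]
    by_cases h2 : n < 2
    · have : n = 1 := by omega
      subst this
      simp only [if_pos (by norm_num : (1:Nat) < 2)]
      rw [pvG]
      norm_num [pvW, show Nat.digitChar 1 = '1' from rfl, show pvG 0 = 0 from by rw [pvG]; simp]
    · rw [if_neg h2, List.reverse_append]
      simp only [List.reverse_cons, List.reverse_nil, List.nil_append, List.singleton_append]
      rw [pvW, ih (n / 2) (by omega) (by omega)]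
      have hg : pvG n = ((n % 2 : Nat) : Int) + 10 * pvG (n / 2) := by
        rw [pvG]; simp only [if_neg (by omega : ¬ n = 0)]
      rw [hg]
      rcases Nat.mod_two_eq_zero_or_one n with h | h <;> rw [h] <;>
        norm_num [show Nat.digitChar 0 = '0' from rfl, show Nat.digitChar 1 = '1' from rfl,
          show ¬('0' = '1') from by decide]

-- ===== VERDICT (by name: the statement is the Claim_ definition above) =====
theorem f10to2_spec : Claim_equal_f10to2 := by
  unfold Claim_equal_f10to2
  intro x _
  unfold Spec_f10to2 f10to2 f10to2_alt
  by_cases hx : x ≤ 0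
  · rw [f10to2Loop]
    simp [hx, if_neg (by omega : ¬ x > 0)]
  · rw [if_neg hx, pvLoop_eq]
    have hbin : (PySem.Int.pyBin x).toList = '0' :: 'b' :: Nat.toDigits 2 x.toNat := by
      rw [PySem.Int.toList_pyBin, PySem.Int.toBinChars0b]
      simp [if_neg (by omega : ¬ x < 0)]
    rw [hbin]
    rw [show (2 : Int) = ((2 : Nat) : Int) from rfl, PySem.List.slice_from_natCast]
    simp only [List.drop_succ_cons, List.drop_zero]
    rw [pvFold_eq _ 0 0 (by omega), pvW_rev x.toNat (by omega)]
    simp
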